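-- pv_equiv track=rewrite | github.com/Excellcode/6.1010 | 6.1010/sat/sat/lab.py | boolify_scheduling_problem
-- ===== SOURCE A (Python) =====
-- def build_comb(maxim, room_cap):
--     """Generates combinations recursively.
--
--     Args:
--         maxim (int): Number of items to choose from.
--         room_cap (int): Number of items to choose - 1.
--     """
--     # We need to choose k items, where k is 1 more than the capacity
--
--     indices = list(range(maxim))
--
--     def find_comb_recursive(start_index, current_combination):
--         # Base case: we've picked k items, yield a copy
--         if len(current_combination) == room_cap + 1:
--             yield tuple(current_combination)
--             # Yield a found combination.
--             return
--
--         # Recursive step: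
--         # Iterate from the current start index to the end
--         # This prevents duplicate combinations (e.g., (0, 1) and (1, 0))
--         for i in range(start_index, len(indices)):
--             # Choose: Add the item to our current path
--             current_combination.append(indices[i])
--
--             # Explore: Recurse, starting from the *next* index (i + 1)
--             # Explore deeper.
--             yield from find_comb_recursive(i + 1, current_combination)
--
--             # Unchoose: Backtrack by removing the item
--             current_combination.pop()
--
--     # Start the generator
--     return find_comb_recursive(0, [])
--
-- def boolify_scheduling_problem(student_preferences, room_capacities):
--     """Converts scheduling problem to a Boolean formula.
--
--     Args:
--         student_preferences (dict): Map of student to preferred room set.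
--         room_capacities (dict): Map of room name to integer capacity.
--     """
--     result = []
--     for student, rooms in student_preferences.items():
--         main_rule = []
--         for room in room_capacities:
--             var = student + "_" + room
--             if room in rooms:
--                 main_rule.append((var, True))
--             else:
--                 # Student not in non-preferred rooms.
--                 result.append([(var, False)])
--         result.append(main_rule)
--         result.extend(
--             [
--                 [(main_rule[i][0], False), (main_rule[j][0], False)]
--                 # Student in at most one room.
--                 for i in range(len(main_rule))
--                 for j in range(len(main_rule))
--                 if i != j
--             ]
--         )
--     stud_names = list(student_preferences.keys())
--     maxim = len(stud_names)
--     result_2 = []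
--     # Room capacity not exceeded.
--     for room, num in room_capacities.items():
--         if num >= maxim:
--             continue
--         all_comb = build_comb(maxim, num)
--         # For each combo of (cap+1) students, add clause:
--         # "at least one is NOT in the room".
--         for tuples in all_comb:
--             result_2.append(
--                 [(stud_names[index] + "_" + room, False) for index in tuples]
--             )
--
--     return result_2 + result
-- ===== SOURCE B (Python) =====
-- def _combos(xs, k):
--     """All k-element combinations of xs as tuples, in order (take-head / skip-head recursion)."""
--     if k == 0:
--         return [()]
--     if not xs:
--         return []
--     head, rest = xs[0], xs[1:]
--     return [(head,) + tail for tail in _combos(rest, k - 1)] + _combos(rest, k)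
--
--
-- def boolify_scheduling_problem(student_preferences, room_capacities):
--     """Converts scheduling problem to a Boolean formula.
--
--     Args:
--         student_preferences (dict): Map of student to preferred room set.
--         room_capacities (dict): Map of room name to integer capacity.
--     """
--     students = list(student_preferences)
--     n = len(students)
--
--     # Room capacity not exceeded: for each (cap+1)-combination of students,
--     # at least one of them is not in the room.
--     cap_clauses = [
--         [(s + "_" + room, False) for s in combo]
--         for room, cap in room_capacities.items()
--         if cap < n
--         for combo in _combos(students, cap + 1)
--     ]
--
--     pref_clauses = []
--     for student, prefs in student_preferences.items():
--         liked = [student + "_" + room for room, _ in room_capacities.items() if room in prefs]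
--         # Student not in non-preferred rooms.
--         pref_clauses.extend(
--             [(student + "_" + room, False)]
--             for room, _ in room_capacities.items()
--             if room not in prefs
--         )
--         # Student in at least one preferred room.
--         pref_clauses.append([(var, True) for var in liked])
--         # Student in at most one room.
--         pref_clauses.extend(
--             [(u, False), (v, False)]
--             for i, u in enumerate(liked)
--             for j, v in enumerate(liked)
--             if i != j
--         )
--     return cap_clauses + pref_clauses
-- ===== Notes on version B (the rewrite author's own statement) =====
-- stated objective: simpler
-- what changed: Replaces A's index-based choose/explore/backtrack generator (build_comb with an inner recursive generator over index lists) by a structural take-head/skip-head combinations recursion over the student list itself, and rebuilds the clause lists with comprehension-style filters and enumerate instead of the stateful dual-accumulator loop and the range-index double loop.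
import Mathlib
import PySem

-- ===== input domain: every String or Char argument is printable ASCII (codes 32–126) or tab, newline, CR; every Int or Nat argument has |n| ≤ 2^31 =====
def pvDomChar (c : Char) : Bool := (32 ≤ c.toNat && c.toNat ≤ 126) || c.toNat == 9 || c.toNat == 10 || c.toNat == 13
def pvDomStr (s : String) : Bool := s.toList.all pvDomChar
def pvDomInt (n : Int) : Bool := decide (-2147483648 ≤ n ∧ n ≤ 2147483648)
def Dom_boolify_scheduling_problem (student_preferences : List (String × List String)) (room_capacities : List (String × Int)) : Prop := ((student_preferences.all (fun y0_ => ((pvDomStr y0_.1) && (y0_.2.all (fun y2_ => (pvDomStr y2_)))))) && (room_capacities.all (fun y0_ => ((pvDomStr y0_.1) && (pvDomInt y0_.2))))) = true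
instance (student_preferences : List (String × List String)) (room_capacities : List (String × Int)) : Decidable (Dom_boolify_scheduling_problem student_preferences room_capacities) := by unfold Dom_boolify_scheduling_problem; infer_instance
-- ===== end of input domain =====

-- B replaces A's index-based choose/explore/backtrack combination generator with a structural
-- take-head/skip-head recursion over the student list and comprehension-style clause building
-- (objective: simpler); same return value on every input.

-- The dict arguments arrive as association lists; both ports first rebuild the Python dict
-- (insertion order, overwrite in place), exactly as the Python functions receive dicts.
def pvToDict {κ ν : Type} [BEq κ] (l : List (κ × ν)) : PySem.Dict κ ν :=
  l.foldl (fun d kv => d.insert kv.1 kv.2) PySem.Dict.empty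

-- ===== PORT A =====
-- port of build_comb's inner generator find_comb_recursive (collected into a list)
def find_comb_recursive (indices : List Int) (room_cap : Int) (start : Int) (cur : List Int) :
    List (List Int) :=
  if (cur.length : Int) = room_cap + 1 then [cur]
  else
    (PySem.List.pyRange start (PySem.List.len indices)).attach.foldl
      (fun acc i => acc ++ find_comb_recursive indices room_cap (i.1 + 1)
          (cur ++ [PySem.List.pyGetD indices i.1 0]))
      []
termination_by (PySem.List.len indices - start).toNat
decreasing_by
  have h := PySem.List.mem_pyRange_one.mp i.2
  omega

def build_comb (maxim : Int) (room_cap : Int) : List (List Int) :=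
  find_comb_recursive (PySem.List.pyRange 0 maxim) room_cap 0 []

def boolify_scheduling_problem (student_preferences : List (String × List String)) (room_capacities : List (String × Int)) : List (List (String × Bool)) :=
  let spd := pvToDict student_preferences
  let rcd := pvToDict room_capacities
  let result := spd.items.foldl (fun result sr =>
    let p := rcd.items.foldl
      (fun (mr_res : List (String × Bool) × List (List (String × Bool))) rv =>
        let var := sr.1 ++ "_" ++ rv.1
        if sr.2.contains rv.1 then (mr_res.1 ++ [(var, true)], mr_res.2)
        else (mr_res.1, mr_res.2 ++ [[(var, false)]]))
      ([], result)
    let main_rule := p.1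
    let result := p.2 ++ [main_rule]
    result ++ (PySem.List.pyRange 0 (PySem.List.len main_rule)).flatMap (fun i =>
      (PySem.List.pyRange 0 (PySem.List.len main_rule)).filterMap (fun j =>
        if i ≠ j then
          some [((PySem.List.pyGetD main_rule i ("", true)).1, false),
                ((PySem.List.pyGetD main_rule j ("", true)).1, false)]
        else none)))
    []
  let stud_names := spd.keys
  let maxim : Int := PySem.List.len stud_names
  let result_2 := rcd.items.foldl (fun r2 rn =>
    if rn.2 ≥ maxim then r2
    else r2 ++ (build_comb maxim rn.2).map (fun tuples =>
      tuples.map (fun index => (PySem.List.pyGetD stud_names index "" ++ "_" ++ rn.1, false))))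
    []
  result_2 ++ result

-- ===== PORT B =====
-- port of _combos: take-head / skip-head recursion
def pvCombos {α : Type} (xs : List α) (k : Int) : List (List α) :=
  if k = 0 then [[]]
  else
    match xs with
    | [] => []
    | head :: rest => (pvCombos rest (k - 1)).map (head :: ·) ++ pvCombos rest k

def boolify_scheduling_problem_alt (student_preferences : List (String × List String)) (room_capacities : List (String × Int)) : List (List (String × Bool)) :=
  let spd := pvToDict student_preferences
  let rcd := pvToDict room_capacities
  let students := spd.keys
  let n : Int := PySem.List.len students
  let cap_clauses := rcd.items.flatMap (fun rc =>
    if rc.2 < n then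
      (pvCombos students (rc.2 + 1)).map (fun combo =>
        combo.map (fun s => (s ++ "_" ++ rc.1, false)))
    else [])
  let pref_clauses := spd.items.foldl (fun pc sp =>
    let liked := rcd.items.filterMap (fun rv =>
      if sp.2.contains rv.1 then some (sp.1 ++ "_" ++ rv.1) else none)
    let pc := pc ++ rcd.items.filterMap (fun rv =>
      if !sp.2.contains rv.1 then some [(sp.1 ++ "_" ++ rv.1, false)] else none)
    let pc := pc ++ [liked.map (fun var => (var, true))]
    pc ++ (PySem.List.enumerate liked).flatMap (fun iu =>
      (PySem.List.enumerate liked).filterMap (fun jv =>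
        if iu.1 ≠ jv.1 then some [(iu.2, false), (jv.2, false)] else none)))
    []
  cap_clauses ++ pref_clauses

-- ===== PRECONDITION & SPEC =====
def Spec_boolify_scheduling_problem (student_preferences : List (String × List String)) (room_capacities : List (String × Int)) (out : List (List (String × Bool))) : Prop := out = boolify_scheduling_problem_alt student_preferences room_capacities
instance (student_preferences : List (String × List String)) (room_capacities : List (String × Int)) (out : List (List (String × Bool))) : Decidable (Spec_boolify_scheduling_problem student_preferences room_capacities out) := by unfold Spec_boolify_scheduling_problem; infer_instance

-- ===== CLAIM (what is proved, stated in full; the proofs are below) =====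
def Claim_equal_boolify_scheduling_problem : Prop := ∀ (student_preferences : List (String × List String)) (room_capacities : List (String × Int)), Dom_boolify_scheduling_problem student_preferences room_capacities → Spec_boolify_scheduling_problem student_preferences room_capacities (boolify_scheduling_problem student_preferences room_capacities)

-- ===== LEMMAS AND PROOFS =====

theorem pvPyRange_nil {a b : Int} (h : b ≤ a) : PySem.List.pyRange a b = [] := by
  rw [List.eq_nil_iff_forall_not_mem]
  intro x hx
  have := PySem.List.mem_pyRange_one.mp hx
  omega

theorem pvLenRange (n : Nat) : PySem.List.len (PySem.List.pyRange 0 (n : Int)) = (n : Int) := by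
  simp [PySem.List.pyRange_zero_natCast]

theorem pvGetRange (n : Nat) (i : Int) (h0 : 0 ≤ i) (h1 : i < (n : Int)) :
    PySem.List.pyGetD (PySem.List.pyRange 0 (n : Int)) i 0 = i := by
  rw [PySem.List.pyGetD_eq_getElem _ _ h0 (by simpa [PySem.List.pyRange_zero_natCast] using h1)]
  simp [PySem.List.pyRange_zero_natCast]
  omega

theorem pvCombos_zero {α : Type} (xs : List α) : pvCombos xs 0 = [[]] := by
  unfold pvCombos; simp

theorem pvCombos_nil {α : Type} {k : Int} (h : k ≠ 0) : pvCombos ([] : List α) k = [] := by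
  unfold pvCombos; simp [h]

theorem pvCombos_cons {α : Type} {k : Int} (h : k ≠ 0) (x : α) (xs : List α) :
    pvCombos (x :: xs) k = (pvCombos xs (k - 1)).map (x :: ·) ++ pvCombos xs k := by
  conv_lhs => rw [pvCombos]
  simp [h]

theorem pvCombos_map {α β : Type} (f : α → β) :
    ∀ (l : List α) (k : Int), pvCombos (l.map f) k = (pvCombos l k).map (List.map f) := by
  intro l
  induction l with
  | nil => intro k; by_cases h : k = 0 <;> simp [pvCombos_zero, pvCombos_nil, h]
  | cons x xs ih =>
    intro k
    by_cases h : k = 0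
    · simp [h, pvCombos_zero]
    · rw [List.map_cons, pvCombos_cons h, pvCombos_cons h, ih, ih]
      simp [List.map_map, Function.comp]

theorem pvFoldAttachFlat (g : Int → List (List Int)) (l : List Int) :
    l.attach.foldl (fun acc i => acc ++ g i.1) [] = l.flatMap g := by
  rw [List.foldl_attach (f := fun acc i => acc ++ g i), PySem.List.foldl_append_eq_flatMap,
    List.nil_append]

-- A's recursive index generator = B's take-head/skip-head combos over the remaining range
theorem pvFindComb_eq (n : Nat) (room_cap : Int) :
    ∀ (m : Nat) (start : Int) (cur : List Int), 0 ≤ start → ((n : Int) - start).toNat = m →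
      find_comb_recursive (PySem.List.pyRange 0 (n : Int)) room_cap start cur
        = (pvCombos (PySem.List.pyRange start (n : Int)) (room_cap + 1 - cur.length)).map
            (cur ++ ·) := by
  intro m
  induction m using Nat.strong_induction_on with
  | _ m ih =>
    intro start cur h0 hm
    rw [find_comb_recursive]
    by_cases hbase : (cur.length : Int) = room_cap + 1
    · rw [if_pos hbase]
      have hz : room_cap + 1 - (cur.length : Int) = 0 := by omega
      rw [hz, pvCombos_zero]
      simp
    · rw [if_neg hbase]
      have hk : room_cap + 1 - (cur.length : Int) ≠ 0 := by
        intro h; exact hbase (by omega)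
      rw [pvLenRange n, pvFoldAttachFlat (fun i => find_comb_recursive (PySem.List.pyRange 0 (n : Int)) room_cap (i + 1) (cur ++ [PySem.List.pyGetD (PySem.List.pyRange 0 (n : Int)) i 0])) _]
      by_cases hlt : start < (n : Int)
      · rw [PySem.List.pyRange_one_cons hlt, List.flatMap_cons]
        have htail :
            (PySem.List.pyRange (start + 1) (n : Int)).flatMap
              (fun i => find_comb_recursive (PySem.List.pyRange 0 (n : Int)) room_cap (i + 1)
                (cur ++ [PySem.List.pyGetD (PySem.List.pyRange 0 (n : Int)) i 0]))
            = (pvCombos (PySem.List.pyRange (start + 1) (n : Int))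
                (room_cap + 1 - cur.length)).map (cur ++ ·) := by
          have hstep : find_comb_recursive (PySem.List.pyRange 0 (n : Int)) room_cap (start + 1) cur
              = (PySem.List.pyRange (start + 1) (n : Int)).flatMap
                  (fun i => find_comb_recursive (PySem.List.pyRange 0 (n : Int)) room_cap (i + 1)
                    (cur ++ [PySem.List.pyGetD (PySem.List.pyRange 0 (n : Int)) i 0])) := by
            rw [find_comb_recursive, if_neg hbase, pvLenRange n, pvFoldAttachFlat (fun i => find_comb_recursive (PySem.List.pyRange 0 (n : Int)) room_cap (i + 1) (cur ++ [PySem.List.pyGetD (PySem.List.pyRange 0 (n : Int)) i 0])) _]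
          rw [← hstep]
          exact ih ((n : Int) - (start + 1)).toNat (by omega) (start + 1) cur (by omega) rfl
        rw [htail, pvGetRange n start h0 hlt]
        rw [ih ((n : Int) - (start + 1)).toNat (by omega) (start + 1) (cur ++ [start])
          (by omega) rfl]
        rw [pvCombos_cons hk]
        simp only [List.map_append, List.map_map]
        congr 1
        have harg : room_cap + 1 - ((cur ++ [start]).length : Int)
            = room_cap + 1 - (cur.length : Int) - 1 := by
          simp; omega
        rw [harg]
        apply List.map_congr_left
        intro t _
        simp
      · have hnil : PySem.List.pyRange start (n : Int) = [] := pvPyRange_nil (by omega)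
        rw [hnil]
        simp [pvCombos_nil hk]

-- A's capacity clauses for one room = B's
theorem pvCaps_eq (stud_names : List String) (room : String) (num : Int) :
    (build_comb (PySem.List.len stud_names) num).map (fun tuples =>
        tuples.map (fun index => (PySem.List.pyGetD stud_names index "" ++ "_" ++ room, false)))
    = (pvCombos stud_names (num + 1)).map (fun combo =>
        combo.map (fun s => (s ++ "_" ++ room, false))) := by
  unfold build_comb
  rw [PySem.List.len_eq,
    pvFindComb_eq stud_names.length num ((stud_names.length : Int) - 0).toNat 0 [] le_rfl rfl]
  conv_rhs => rw [← PySem.List.map_pyGetD_pyRange_zero' stud_names "", pvCombos_map]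
  simp [List.map_map, Function.comp]

-- A's pref inner loop splits into the (var, True) list and the appended unit clauses
theorem pvInnerFold (sr : String × List String) (l : List (String × Int))
    (mr0 : List (String × Bool)) (res0 : List (List (String × Bool))) :
    l.foldl
      (fun (mr_res : List (String × Bool) × List (List (String × Bool))) rv =>
        let var := sr.1 ++ "_" ++ rv.1
        if sr.2.contains rv.1 then (mr_res.1 ++ [(var, true)], mr_res.2)
        else (mr_res.1, mr_res.2 ++ [[(var, false)]]))
      (mr0, res0)
    = (mr0 ++ l.filterMap (fun rv =>
          if sr.2.contains rv.1 then some (sr.1 ++ "_" ++ rv.1, true) else none),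
       res0 ++ l.filterMap (fun rv =>
          if !sr.2.contains rv.1 then some [(sr.1 ++ "_" ++ rv.1, false)] else none)) := by
  induction l generalizing mr0 res0 with
  | nil => simp
  | cons x xs ih =>
    by_cases h : sr.2.contains x.1 <;>
      simp only [List.foldl_cons, List.filterMap_cons, h, Bool.not_true, Bool.not_false,
        if_true, ih] <;> simp

theorem pvEnumerate_eq {α : Type} (l : List α) (d : α) :
    ∀ s : Int, PySem.List.enumerate l s
      = (List.range l.length).map (fun (i : Nat) => (s + (i : Int), l.getD i d)) := by
  induction l with
  | nil => simp [PySem.List.enumerate]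
  | cons x xs ih =>
    intro s
    rw [PySem.List.enumerate_cons, ih (s + 1), List.length_cons, List.range_succ_eq_map,
      List.map_cons, List.map_map]
    refine List.cons_eq_cons.mpr ⟨by simp, ?_⟩
    apply List.map_congr_left
    intro i _
    refine Prod.ext ?_ ?_
    · show s + 1 + (i : Int) = s + ((i.succ : Nat) : Int)
      push_cast; ring
    · simp [Function.comp]

-- A's index-pair double loop over main_rule = B's enumerate double loop over liked
theorem pvPairs_eq (l : List String) :
    (PySem.List.pyRange 0 (PySem.List.len (l.map (fun var => (var, true))))).flatMap (fun i =>
      (PySem.List.pyRange 0 (PySem.List.len (l.map (fun var => (var, true))))).filterMap (fun j =>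
        if i ≠ j then
          some [((PySem.List.pyGetD (l.map (fun var => (var, true))) i ("", true)).1, false),
                ((PySem.List.pyGetD (l.map (fun var => (var, true))) j ("", true)).1, false)]
        else none))
    = (PySem.List.enumerate l).flatMap (fun iu =>
        (PySem.List.enumerate l).filterMap (fun jv =>
          if iu.1 ≠ jv.1 then some [(iu.2, false), (jv.2, false)] else none)) := by
  rw [pvEnumerate_eq l ""]
  simp only [PySem.List.len_eq, List.length_map, PySem.List.pyRange_zero_natCast,
    List.flatMap_map, List.filterMap_map]
  apply List.flatMap_congr
  intro i _
  apply List.filterMap_congr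
  intro j _
  simp [Function.comp, List.getD_eq_getElem?_getD, List.getElem?_map]

-- foldl with a skip-guard and append = flatMap with an if
theorem pvFoldSkip {α β : Type} (P : α → Prop) [DecidablePred P] (f : α → List β) (l : List α) :
    l.foldl (fun acc x => if P x then acc else acc ++ f x) []
      = l.flatMap (fun x => if P x then [] else f x) := by
  have h : (fun (acc : List β) x => if P x then acc else acc ++ f x)
      = fun acc x => acc ++ (if P x then [] else f x) := by
    funext acc x; split <;> simp
  rw [h, PySem.List.foldl_append_eq_flatMap, List.nil_append]

-- ===== VERDICT (by name: the statement is the Claim_ definition above) =====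
theorem boolify_scheduling_problem_spec : Claim_equal_boolify_scheduling_problem := by
  intro sp rc _
  unfold Spec_boolify_scheduling_problem
  simp only [boolify_scheduling_problem, boolify_scheduling_problem_alt]
  congr 1
  -- capacity clauses
  · rw [pvFoldSkip (fun rn : String × Int => rn.2 ≥ PySem.List.len (pvToDict sp).keys)
      (fun rn => (build_comb (PySem.List.len (pvToDict sp).keys) rn.2).map (fun tuples =>
        tuples.map (fun index =>
          (PySem.List.pyGetD (pvToDict sp).keys index "" ++ "_" ++ rn.1, false))))]
    apply List.flatMap_congr
    intro rn _
    by_cases h : rn.2 ≥ PySem.List.len (pvToDict sp).keys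
    · rw [if_pos h, if_neg (by omega)]
    · rw [if_neg h, if_pos (by omega)]
      exact pvCaps_eq (pvToDict sp).keys rn.1 rn.2
  -- preference clauses
  · congr 1
    funext res sr
    rw [pvInnerFold]
    simp only [List.nil_append]
    have hmr : (pvToDict rc).items.filterMap (fun rv =>
          if sr.2.contains rv.1 then some (sr.1 ++ "_" ++ rv.1, true) else none)
        = ((pvToDict rc).items.filterMap (fun rv =>
            if sr.2.contains rv.1 then some (sr.1 ++ "_" ++ rv.1) else none)).map
          (fun var => (var, true)) := by
      simp [List.map_filterMap, apply_ite]
    rw [hmr, pvPairs_eq ((pvToDict rc).items.filterMap (fun rv =>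
      if sr.2.contains rv.1 then some (sr.1 ++ "_" ++ rv.1) else none))]
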